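-- pv_equiv track=rewrite | github.com/nauvis/plx | src/plx/export/py/_helpers.py | _iec_string_to_python
-- ===== SOURCE A (Python) =====
-- def _iec_string_to_python(value: str) -> str:
--     """Convert an IEC 61131-3 quoted string literal to a Python string literal.
--
--     Strips outer IEC quotes, un-escapes ``$`` sequences, and re-quotes for
--     Python using ``repr()`` which handles backslashes and special characters.
--
--     IEC escape sequences:
--       ``$'`` → ``'``, ``$"`` → ``"``, ``$$`` → ``$``,
--       ``$N``/``$L`` → newline, ``$R`` → carriage return,
--       ``$T`` → tab, ``$P`` → form feed
--     """
--     # Determine and strip outer quotes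
--     if len(value) >= 2 and value[0] in ("'", '"') and value[-1] == value[0]:
--         inner = value[1:-1]
--     else:
--         return value  # not a quoted string — return as-is
--
--     # Un-escape IEC $ sequences
--     chars: list[str] = []
--     i = 0
--     while i < len(inner):
--         if inner[i] == "$" and i + 1 < len(inner):
--             nc = inner[i + 1]
--             if nc == "'":
--                 chars.append("'")
--             elif nc == '"':
--                 chars.append('"')
--             elif nc == "$":
--                 chars.append("$")
--             elif nc in ("N", "n", "L", "l"):
--                 chars.append("\n")
--             elif nc in ("R", "r"):
--                 chars.append("\r")
--             elif nc in ("T", "t"):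
--                 chars.append("\t")
--             elif nc in ("P", "p"):
--                 chars.append("\f")
--             else:
--                 # Unknown $ escape — preserve both chars
--                 chars.append("$")
--                 chars.append(nc)
--             i += 2
--         else:
--             chars.append(inner[i])
--             i += 1
--
--     # Re-quote for Python (repr handles backslashes, quotes, control chars)
--     return repr("".join(chars))
-- ===== SOURCE B (Python) =====
-- import re
--
-- _ESC = {
--     "'": "'",
--     '"': '"',
--     "$": "$",
--     "N": "\n", "n": "\n", "L": "\n", "l": "\n",
--     "R": "\r", "r": "\r",
--     "T": "\t", "t": "\t",
--     "P": "\f", "p": "\f",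
-- }
--
--
-- def _iec_string_to_python(value: str) -> str:
--     if len(value) < 2:
--         return value
--     if value[0] not in ("'", '"') or value[-1] != value[0]:
--         return value
--     inner = value[1:-1]
--     unescaped = re.sub(
--         r"\$(.)",
--         lambda m: _ESC.get(m.group(1), "$" + m.group(1)),
--         inner,
--         flags=re.DOTALL,
--     )
--     return repr(unescaped)
-- ===== Notes on version B (the rewrite author's own statement) =====
-- stated objective: idiomatic
-- what changed: The manual index-advancing while-loop with a seven-branch if/elif chain is replaced by a single regex substitution (dollar followed by any char, DOTALL) driven by an escape-table dict with a dollar-plus-char fallback; the quote guard becomes early returns.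
import Mathlib
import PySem

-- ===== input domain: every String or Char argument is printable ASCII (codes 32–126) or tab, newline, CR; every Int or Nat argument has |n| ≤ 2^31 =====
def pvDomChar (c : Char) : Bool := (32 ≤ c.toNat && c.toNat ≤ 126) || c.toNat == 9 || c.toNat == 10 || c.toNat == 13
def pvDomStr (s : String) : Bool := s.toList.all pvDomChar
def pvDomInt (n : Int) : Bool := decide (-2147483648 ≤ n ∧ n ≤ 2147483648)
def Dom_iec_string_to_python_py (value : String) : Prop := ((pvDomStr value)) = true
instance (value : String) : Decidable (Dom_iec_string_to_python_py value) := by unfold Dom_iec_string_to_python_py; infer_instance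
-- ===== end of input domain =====

-- B replaces A's manual index/while escape state machine by a single substitution pass driven
-- by an escape table (a dict lookup with a '$'+char fallback); objective: idiomatic, same cost.

-- Shared port of Python's builtin repr() on strings, exact for ASCII chars (code ≤ 126,
-- including tab/newline/CR/formfeed); both Pythons call repr at the end.
def pyReprHexDigit (n : Nat) : Char := if n < 10 then Char.ofNat (48 + n) else Char.ofNat (87 + n)

def pyReprEscChar (q c : Char) : List Char :=
  if c = '\\' then ['\\', '\\']
  else if c = q then ['\\', q]
  else if c = '\n' then ['\\', 'n']
  else if c = '\r' then ['\\', 'r']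
  else if c = '\t' then ['\\', 't']
  else if 32 ≤ c.toNat ∧ c.toNat ≤ 126 then [c]
  else ['\\', 'x', pyReprHexDigit (c.toNat / 16), pyReprHexDigit (c.toNat % 16)]

def pyRepr (l : List Char) : String :=
  let q : Char := if '\'' ∈ l ∧ '"' ∉ l then '"' else '\''
  String.ofList ([q] ++ l.flatMap (pyReprEscChar q) ++ [q])

-- ===== PORT A =====

-- the if/elif chain of A's loop body (each branch is one chars.append)
def emitA (nc : Char) : List Char :=
  if nc = '\'' then ['\'']
  else if nc = '"' then ['"']
  else if nc = '$' then ['$']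
  else if nc = 'N' ∨ nc = 'n' ∨ nc = 'L' ∨ nc = 'l' then ['\n']
  else if nc = 'R' ∨ nc = 'r' then ['\r']
  else if nc = 'T' ∨ nc = 't' then ['\t']
  else if nc = 'P' ∨ nc = 'p' then ['\x0C']
  else ['$', nc]

-- A's while loop: index i, accumulator chars
def unescA (inner : List Char) (chars : List Char) (i : Nat) : List Char :=
  if h : i < inner.length then
    if h2 : inner[i] = '$' ∧ i + 1 < inner.length then
      unescA inner (chars ++ emitA (inner[i + 1]'h2.2)) (i + 2)
    else
      unescA inner (chars ++ [inner[i]]) (i + 1)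
  else chars
termination_by inner.length - i

def iec_string_to_python_py (value : String) : String :=
  let l := value.toList
  if l.length ≥ 2 ∧ (l.headD ' ' = '\'' ∨ l.headD ' ' = '"') ∧ l.getLastD ' ' = l.headD ' ' then
    pyRepr (unescA ((l.drop 1).dropLast) [] 0)
  else value

-- ===== PORT B =====

-- the _ESC escape table of Source B
def escDict : PySem.Dict Char String :=
  PySem.Dict.ofList
    [('\'', "'"), ('"', "\""), ('$', "$"),
     ('N', "\n"), ('n', "\n"), ('L', "\n"), ('l', "\n"),
     ('R', "\r"), ('r', "\r"), ('T', "\t"), ('t', "\t"),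
     ('P', "\x0C"), ('p', "\x0C")]

-- hand port of re.sub(r"\$(.)", repl, inner, flags=re.DOTALL): exact — non-overlapping
-- left-to-right matches of '$' followed by any char (DOTALL), replaced by the table lookup
-- with the '$'+char fallback; a lone trailing '$' is unmatched and kept.
def subEsc : List Char → List Char
  | [] => []
  | c :: rest =>
    if c = '$' then
      match rest with
      | [] => ['$']
      | nc :: rest' =>
        (match escDict.get? nc with
         | some s => s.toList
         | none => ['$', nc]) ++ subEsc rest'
    else c :: subEsc rest

def iec_string_to_python_py_alt (value : String) : String :=
  let l := value.toList
  if l.length < 2 then value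
  else if ¬ (l.headD ' ' = '\'' ∨ l.headD ' ' = '"') then value
  else if l.getLastD ' ' ≠ l.headD ' ' then value
  else pyRepr (subEsc ((l.drop 1).dropLast))

-- ===== PRECONDITION & SPEC =====
def Spec_iec_string_to_python_py (value : String) (out : String) : Prop := out = iec_string_to_python_py_alt value
instance (value : String) (out : String) : Decidable (Spec_iec_string_to_python_py value out) := by unfold Spec_iec_string_to_python_py; infer_instance

-- ===== CLAIM (what is proved, stated in full; the proofs are below) =====
def Claim_equal_iec_string_to_python_py : Prop := ∀ (value : String), Dom_iec_string_to_python_py value → Spec_iec_string_to_python_py value (iec_string_to_python_py value)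

-- ===== LEMMAS AND PROOFS =====

set_option maxHeartbeats 1000000 in
lemma escDict_emitA (nc : Char) :
    (match escDict.get? nc with
     | some s => s.toList
     | none => ['$', nc]) = emitA nc := by
  by_cases h1 : nc = '\''
  · subst h1; decide
  by_cases h2 : nc = '"'
  · subst h2; decide
  by_cases h3 : nc = '$'
  · subst h3; decide
  by_cases h4 : nc = 'N'
  · subst h4; decide
  by_cases h5 : nc = 'n'
  · subst h5; decide
  by_cases h6 : nc = 'L'
  · subst h6; decide
  by_cases h7 : nc = 'l'
  · subst h7; decide
  by_cases h8 : nc = 'R'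
  · subst h8; decide
  by_cases h9 : nc = 'r'
  · subst h9; decide
  by_cases h10 : nc = 'T'
  · subst h10; decide
  by_cases h11 : nc = 't'
  · subst h11; decide
  by_cases h12 : nc = 'P'
  · subst h12; decide
  by_cases h13 : nc = 'p'
  · subst h13; decide
  simp [escDict, PySem.Dict.ofList, PySem.Dict.update, List.foldl,
    PySem.Dict.get?_insert, PySem.Dict.get?_empty, emitA, h1, h2, h3, h4, h5, h6, h7, h8, h9, h10, h11, h12, h13]

lemma subEsc_nil : subEsc [] = [] := rfl

lemma subEsc_dollar_cons (nc : Char) (rest : List Char) :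
    subEsc ('$' :: nc :: rest) = emitA nc ++ subEsc rest := by
  rw [← escDict_emitA nc]; simp [subEsc]

lemma subEsc_dollar_nil : subEsc ['$'] = ['$'] := rfl

lemma subEsc_cons_ne (c : Char) (rest : List Char) (h : c ≠ '$') :
    subEsc (c :: rest) = c :: subEsc rest := by
  cases rest <;> simp [subEsc, h]

lemma unescA_eq (n : Nat) : ∀ (inner : List Char) (chars : List Char) (i : Nat),
    inner.length - i ≤ n → unescA inner chars i = chars ++ subEsc (inner.drop i) := by
  induction n with
  | zero =>
    intro inner chars i hle
    have hi : ¬ i < inner.length := by omega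
    rw [unescA]
    simp [hi, List.drop_eq_nil_of_le (by omega : inner.length ≤ i), subEsc_nil]
  | succ n ih =>
    intro inner chars i hle
    rw [unescA]
    by_cases hi : i < inner.length
    · simp only [hi, dif_pos]
      have hdrop : inner.drop i = inner[i] :: inner.drop (i + 1) :=
        (List.getElem_cons_drop hi).symm
      by_cases h2 : inner[i] = '$' ∧ i + 1 < inner.length
      · rw [dif_pos h2]
        have hdrop2 : inner.drop (i + 1) = inner[i + 1] :: inner.drop (i + 2) :=
          (List.getElem_cons_drop h2.2).symm
        rw [ih inner _ (i + 2) (by omega), hdrop, hdrop2, h2.1,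
          subEsc_dollar_cons, List.append_assoc]
      · rw [dif_neg h2]
        rw [ih inner _ (i + 1) (by omega), hdrop, List.append_assoc]
        by_cases hd : inner[i] = '$'
        · -- then ¬ (i+1 < length), so drop (i+1) = []
          have : ¬ i + 1 < inner.length := fun hlt => h2 ⟨hd, hlt⟩
          rw [List.drop_eq_nil_of_le (by omega : inner.length ≤ i + 1), hd,
            subEsc_dollar_nil]
          rfl
        · rw [subEsc_cons_ne _ _ hd]
          rfl
    · simp [hi, List.drop_eq_nil_of_le (by omega : inner.length ≤ i), subEsc_nil]

lemma unesc_main (inner : List Char) : unescA inner [] 0 = subEsc inner := by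
  simpa using unescA_eq inner.length inner [] 0 (by omega)

-- ===== VERDICT (by name: the statement is the Claim_ definition above) =====
theorem iec_string_to_python_py_spec : Claim_equal_iec_string_to_python_py := by
  intro value _
  unfold Spec_iec_string_to_python_py iec_string_to_python_py iec_string_to_python_py_alt
  set l := value.toList with hl
  by_cases h1 : l.length < 2
  · rw [if_neg (fun h => absurd h.1 (by omega)), if_pos h1]
  · rw [if_neg h1]
    by_cases h2 : l.headD ' ' = '\'' ∨ l.headD ' ' = '"'
    · by_cases h3 : l.getLastD ' ' = l.headD ' '
      · rw [if_pos (⟨by omega, h2, h3⟩ :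
            l.length ≥ 2 ∧ (l.headD ' ' = '\'' ∨ l.headD ' ' = '"') ∧ l.getLastD ' ' = l.headD ' '),
          if_neg (by tauto), if_neg (show ¬ l.getLastD ' ' ≠ l.headD ' ' from by tauto),
          unesc_main]
      · rw [if_neg (fun h => h3 h.2.2), if_neg (by tauto),
          if_pos (show l.getLastD ' ' ≠ l.headD ' ' from h3)]
    · rw [if_neg (fun h => h2 h.2.1), if_pos (by tauto)]
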